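-- pv_equiv track=rewrite | github.com/Sygaro/tools | r_tools/tools/format_code.py | _py_remove_blank_after_any_block
-- ===== SOURCE A (Python) =====
-- def _is_docstring_start(line: str) -> bool:
--     s = line.lstrip()
--     return s.startswith('"""') or s.startswith("'''")
--
-- def _py_remove_blank_after_any_block(lines: list[str]) -> list[str]:
--     out: list[str] = []
--     i = 0
--     n = len(lines)
--     while i < n:
--         out.append(lines[i])
--         cur = lines[i].rstrip()
--         if cur.endswith(":"):
--             if i + 1 < n and lines[i + 1].strip() == "":
--                 j = i + 2
--                 while j < n and lines[j].strip() == "":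
--                     j += 1
--                 if j < n and not _is_docstring_start(lines[j]):
--                     i += 1
--         i += 1
--     return out
-- ===== SOURCE B (Python) =====
-- def _is_docstring_start(line: str) -> bool:
--     s = line.lstrip()
--     return s.startswith('"""') or s.startswith("'''")
--
-- def _py_remove_blank_after_any_block(lines: list[str]) -> list[str]:
--     n = len(lines)
--     to_drop = set()
--     for i in range(n):
--         if lines[i].rstrip().endswith(":") and i + 1 < n and lines[i + 1].strip() == "":
--             j = i + 2
--             while j < n and lines[j].strip() == "":
--                 j += 1
--             if j < n and not _is_docstring_start(lines[j]):
--                 to_drop.add(i + 1)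
--     return [ln for idx, ln in enumerate(lines) if idx not in to_drop]
-- ===== Notes on version B (the rewrite author's own statement) =====
-- stated objective: alternative
-- what changed: A uses a single in-place cursor loop that skips the blank line by advancing i an extra step; B is two-phase: a first pass marks the set of blank-line indices to drop, a second pass filters the list by index, never manipulating a cursor.
import Mathlib
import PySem

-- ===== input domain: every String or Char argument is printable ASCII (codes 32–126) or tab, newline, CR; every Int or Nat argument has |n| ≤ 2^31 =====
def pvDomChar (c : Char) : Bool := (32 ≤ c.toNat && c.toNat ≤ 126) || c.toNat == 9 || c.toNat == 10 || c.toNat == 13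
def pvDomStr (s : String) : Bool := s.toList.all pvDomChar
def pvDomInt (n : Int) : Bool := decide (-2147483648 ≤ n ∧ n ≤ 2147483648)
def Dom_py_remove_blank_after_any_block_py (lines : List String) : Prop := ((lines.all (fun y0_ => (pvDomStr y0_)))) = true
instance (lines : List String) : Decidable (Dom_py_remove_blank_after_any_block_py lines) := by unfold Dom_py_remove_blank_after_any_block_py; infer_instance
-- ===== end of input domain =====

-- B replaces A's in-place cursor loop (skip one blank by an extra i += 1) with a two-phase
-- mark-then-filter pass (objective: alternative decomposition, same cost).

-- shared module helper (both Python versions contain it verbatim)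
def pvIsDocstringStart (line : String) : Bool :=
  let s := PySem.Str.lstrip line
  PySem.Str.startswith s "\"\"\"" || PySem.Str.startswith s "'''"

-- `lines[j].strip() == ""`
def pvBlank (s : String) : Bool := PySem.Str.strip s == ""

-- the inner `while j < n and lines[j].strip() == "": j += 1` (identical in A and B)
def pvScanBlank (lines : List String) (j : Nat) : Nat :=
  if _h : j < lines.length then
    if pvBlank (lines.getD j "") then pvScanBlank lines (j + 1) else j
  else j
termination_by lines.length - j

-- the block-start/blank-run/docstring test both versions perform at index i
def pvCond (lines : List String) (i : Nat) : Bool :=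
  PySem.Str.endswith (PySem.Str.rstrip (lines.getD i "")) ":" &&
  decide (i + 1 < lines.length) && pvBlank (lines.getD (i + 1) "") &&
  (let j := pvScanBlank lines (i + 2)
   decide (j < lines.length) && !pvIsDocstringStart (lines.getD j ""))

-- ===== PORT A =====
-- A's while-loop: append lines[i], advance i by 2 (skipping the first blank) when the test fires
def pvLoopA (lines : List String) (i : Nat) : List String :=
  if h : i < lines.length then
    lines[i] :: (if pvCond lines i then pvLoopA lines (i + 2) else pvLoopA lines (i + 1))
  else []
termination_by lines.length - i

def py_remove_blank_after_any_block_py (lines : List String) : List String :=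
  pvLoopA lines 0

-- ===== PORT B =====
-- first pass: the set of blank-line indices to drop
def pvDropSet (lines : List String) : PySem.Set Int :=
  (List.range lines.length).foldl
    (fun s i => if pvCond lines i then PySem.Set.add s ((i : Int) + 1) else s)
    PySem.Set.empty

-- second pass: [ln for idx, ln in enumerate(lines) if idx not in to_drop]
def py_remove_blank_after_any_block_py_alt (lines : List String) : List String :=
  let toDrop := pvDropSet lines
  ((PySem.List.enumerate lines).filter
      (fun p => !(PySem.Set.contains toDrop p.1))).map (fun p => p.2)

-- ===== PRECONDITION & SPEC =====
def Spec_py_remove_blank_after_any_block_py (lines : List String) (out : List String) : Prop := out = py_remove_blank_after_any_block_py_alt lines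
instance (lines : List String) (out : List String) : Decidable (Spec_py_remove_blank_after_any_block_py lines out) := by unfold Spec_py_remove_blank_after_any_block_py; infer_instance

-- ===== CLAIM (what is proved, stated in full; the proofs are below) =====
def Claim_equal_py_remove_blank_after_any_block_py : Prop := ∀ (lines : List String), Dom_py_remove_blank_after_any_block_py lines → Spec_py_remove_blank_after_any_block_py lines (py_remove_blank_after_any_block_py lines)

-- ===== LEMMAS AND PROOFS =====

-- membership in the folded-up drop set
theorem pv_mem_foldl_add (lines : List String) (l : List Nat) (s0 : PySem.Set Int) (x : Int) :
    x ∈ l.foldl (fun s i => if pvCond lines i then PySem.Set.add s ((i : Int) + 1) else s) s0 ↔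
      x ∈ s0 ∨ ∃ i ∈ l, pvCond lines i = true ∧ x = (i : Int) + 1 := by
  induction l generalizing s0 with
  | nil => simp
  | cons a t ih =>
    simp only [List.foldl_cons, ih, List.mem_cons]
    by_cases hc : pvCond lines a = true
    · simp only [hc, if_pos, PySem.Set.mem_add]
      constructor
      · rintro (⟨h | h⟩ | ⟨i, hi, hce, hx⟩)
        · exact Or.inl h
        · exact Or.inr ⟨a, Or.inl rfl, hc, h⟩
        · exact Or.inr ⟨i, Or.inr hi, hce, hx⟩
      · rintro (h | ⟨i, hi | hi, hce, hx⟩)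
        · exact Or.inl (Or.inl h)
        · exact Or.inl (Or.inr (hi ▸ hx))
        · exact Or.inr ⟨i, hi, hce, hx⟩
    · simp only [hc, if_neg, Bool.false_eq_true, not_false_iff]
      constructor
      · rintro (h | ⟨i, hi, hce, hx⟩)
        · exact Or.inl h
        · exact Or.inr ⟨i, Or.inr hi, hce, hx⟩
      · rintro (h | ⟨i, hi | hi, hce, hx⟩)
        · exact Or.inl h
        · exact absurd (hi ▸ hce) hc
        · exact Or.inr ⟨i, hi, hce, hx⟩

theorem pv_mem_dropSet (lines : List String) (x : Int) :
    x ∈ pvDropSet lines ↔ ∃ i, i < lines.length ∧ pvCond lines i = true ∧ x = (i : Int) + 1 := by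
  unfold pvDropSet
  rw [pv_mem_foldl_add]
  simp [PySem.Set.empty, List.mem_range]

-- a blank line rstrips to nothing
theorem pv_blank_rstrip (s : String) (h : pvBlank s = true) :
    PySem.Chars.rstrip s.toList = [] := by
  have hs : PySem.Str.strip s = "" := by
    simpa [pvBlank] using h
  have hl : PySem.Chars.strip s.toList = [] := by
    have := congrArg String.toList hs
    simpa [PySem.Str.strip] using this
  have hall : ∀ c ∈ s.toList, PySem.Chars.isspace c = true := by
    have h1 : List.dropWhile PySem.Chars.isspace
        (List.dropWhile PySem.Chars.isspace s.toList).reverse = [] := by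
      simpa [PySem.Chars.strip, PySem.Chars.rstrip, PySem.Chars.lstrip,
        List.reverse_eq_nil_iff] using hl
    have h2 : ∀ c ∈ List.dropWhile PySem.Chars.isspace s.toList,
        PySem.Chars.isspace c = true := by
      intro c hc
      exact (List.dropWhile_eq_nil_iff.mp h1) c (List.mem_reverse.mpr hc)
    intro c hc
    rcases List.mem_append.mp
        ((List.takeWhile_append_dropWhile (p := PySem.Chars.isspace) (l := s.toList)) ▸ hc) with
      h | h
    · exact List.mem_takeWhile_imp h
    · exact h2 c h
  have : List.dropWhile PySem.Chars.isspace s.toList.reverse = [] :=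
    List.dropWhile_eq_nil_iff.mpr (fun c hc => hall c (List.mem_reverse.mp hc))
  simp [PySem.Chars.rstrip, this]

-- if the test fires at i, line i+1 is blank, so the test cannot fire at i+1
theorem pv_cond_parts (lines : List String) (i : Nat) (h : pvCond lines i = true) :
    i + 1 < lines.length ∧ pvBlank (lines.getD (i + 1) "") = true := by
  unfold pvCond at h
  simp only [Bool.and_eq_true, decide_eq_true_eq] at h
  exact ⟨h.1.1.2, h.1.2⟩

theorem pv_not_cond_succ (lines : List String) (i : Nat) (h : pvCond lines i = true) :
    pvCond lines (i + 1) = false := by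
  have hb := (pv_cond_parts lines i h).2
  have hr := pv_blank_rstrip _ hb
  have h2 : (PySem.Str.rstrip (lines.getD (i + 1) "")).toList = [] := by
    rw [PySem.Str.toList_rstrip, hr]
  have hfalse : PySem.Str.endswith (PySem.Str.rstrip (lines.getD (i + 1) "")) ":" = false := by
    unfold PySem.Str.endswith
    rw [h2]
    decide
  unfold pvCond
  simp only [hfalse, Bool.false_and]

-- the suffix of B's output that starts at index i
def pvTail (lines : List String) (i : Nat) : List String :=
  ((PySem.List.enumerate (lines.drop i) (i : Int)).filter
      (fun p => !(PySem.Set.contains (pvDropSet lines) p.1))).map (fun p => p.2)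

theorem pv_alt_eq_tail (lines : List String) :
    py_remove_blank_after_any_block_py_alt lines = pvTail lines 0 := by
  simp [py_remove_blank_after_any_block_py_alt, pvTail]

theorem pv_tail_ge (lines : List String) (i : Nat) (h : lines.length ≤ i) :
    pvTail lines i = [] := by
  unfold pvTail
  rw [List.drop_eq_nil_of_le h]
  simp [PySem.List.enumerate]

theorem pv_tail_step (lines : List String) (i : Nat) (h : i < lines.length) :
    pvTail lines i =
      if (i : Int) ∈ pvDropSet lines then pvTail lines (i + 1)
      else lines[i] :: pvTail lines (i + 1) := by
  unfold pvTail
  rw [List.drop_eq_getElem_cons h, PySem.List.enumerate_cons]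
  have hcast : ((i : Int) + 1) = ((i + 1 : Nat) : Int) := by push_cast; ring
  rw [hcast]
  by_cases hm : (i : Int) ∈ pvDropSet lines
  · simp [hm, PySem.Set.contains]
  · simp [hm, PySem.Set.contains]

theorem pv_loopA_eq_tail (lines : List String) :
    ∀ k i, lines.length - i ≤ k → (i : Int) ∉ pvDropSet lines →
      pvLoopA lines i = pvTail lines i := by
  intro k
  induction k with
  | zero =>
    intro i hk _
    have hge : lines.length ≤ i := by omega
    rw [pvLoopA, dif_neg (by omega), pv_tail_ge lines i hge]
  | succ k ih =>
    intro i hk hmem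
    by_cases h : i < lines.length
    · have hstep : pvLoopA lines i =
          lines[i] :: (if pvCond lines i then pvLoopA lines (i + 2) else pvLoopA lines (i + 1)) := by
        rw [pvLoopA, dif_pos h]
      rw [hstep, pv_tail_step lines i h, if_neg hmem]
      by_cases hc : pvCond lines i = true
      · -- index i+1 is dropped; A jumps to i+2
        have hi1 : i + 1 < lines.length := (pv_cond_parts lines i hc).1
        have hmem1 : ((i + 1 : Nat) : Int) ∈ pvDropSet lines := by
          rw [pv_mem_dropSet]
          exact ⟨i, h, hc, by push_cast; ring⟩
        have hmem2 : ((i + 2 : Nat) : Int) ∉ pvDropSet lines := by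
          intro hm
          rcases (pv_mem_dropSet lines _).mp hm with ⟨i', _, hc', he⟩
          have : i' = i + 1 := by omega
          rw [this, pv_not_cond_succ lines i hc] at hc'
          exact Bool.false_ne_true hc'
        rw [hc, if_pos rfl, pv_tail_step lines (i + 1) hi1, if_pos hmem1]
        exact congrArg _ (ih (i + 2) (by omega) hmem2)
      · -- nothing dropped here; A advances by 1
        have hmem1 : ((i + 1 : Nat) : Int) ∉ pvDropSet lines := by
          intro hm
          rcases (pv_mem_dropSet lines _).mp hm with ⟨i', _, hc', he⟩
          have : i' = i := by omega
          exact hc (this ▸ hc')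
        rw [if_neg hc]
        exact congrArg _ (ih (i + 1) (by omega) hmem1)
    · rw [pvLoopA, dif_neg h, pv_tail_ge lines i (by omega)]

-- ===== VERDICT (by name: the statement is the Claim_ definition above) =====
theorem py_remove_blank_after_any_block_py_spec : Claim_equal_py_remove_blank_after_any_block_py := by
  intro lines _
  show py_remove_blank_after_any_block_py lines = py_remove_blank_after_any_block_py_alt lines
  have h0 : ((0 : Nat) : Int) ∉ pvDropSet lines := by
    intro hm
    rcases (pv_mem_dropSet lines _).mp hm with ⟨i', _, _, he⟩
    omega
  rw [py_remove_blank_after_any_block_py, pv_alt_eq_tail,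
    pv_loopA_eq_tail lines (lines.length - 0) 0 (le_refl _) h0]
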